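-- pv_equiv track=rewrite | github.com/Kmhopper/NotatApp | app.py | _trim_prefix_from_runs
-- ===== SOURCE A (Python) =====
-- def _trim_prefix_from_runs(runs, prefix_len):
--     remaining = max(0, int(prefix_len))
--     trimmed = []
--     for run_text, is_bold, is_superscript in runs:
--         if remaining >= len(run_text):
--             remaining -= len(run_text)
--             continue
--         if remaining > 0:
--             run_text = run_text[remaining:]
--             remaining = 0
--         if run_text:
--             trimmed.append((run_text, is_bold, is_superscript))
--     return trimmed
-- ===== SOURCE B (Python) =====
-- def _trim_prefix_from_runs(runs, prefix_len):
--     k = max(0, int(prefix_len))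
--     i = 0
--     n = len(runs)
--     # phase 1: skip runs wholly consumed by the prefix (this also skips empty runs)
--     while i < n and k >= len(runs[i][0]):
--         k -= len(runs[i][0])
--         i += 1
--     if i == n:
--         return []
--     # phase 2: slice the boundary run, then keep the non-empty remaining runs
--     text, is_bold, is_superscript = runs[i]
--     return [(text[k:], is_bold, is_superscript)] + [r for r in runs[i + 1:] if r[0]]
-- ===== Notes on version B (the rewrite author's own statement) =====
-- stated objective: alternative
-- what changed: A interleaves prefix consumption and output building in one stateful loop; B is two-phase: a skip loop first finds the boundary run and the character offset into it, then the result is built directly as the sliced boundary run plus the non-empty remaining runs.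
import Mathlib
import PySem

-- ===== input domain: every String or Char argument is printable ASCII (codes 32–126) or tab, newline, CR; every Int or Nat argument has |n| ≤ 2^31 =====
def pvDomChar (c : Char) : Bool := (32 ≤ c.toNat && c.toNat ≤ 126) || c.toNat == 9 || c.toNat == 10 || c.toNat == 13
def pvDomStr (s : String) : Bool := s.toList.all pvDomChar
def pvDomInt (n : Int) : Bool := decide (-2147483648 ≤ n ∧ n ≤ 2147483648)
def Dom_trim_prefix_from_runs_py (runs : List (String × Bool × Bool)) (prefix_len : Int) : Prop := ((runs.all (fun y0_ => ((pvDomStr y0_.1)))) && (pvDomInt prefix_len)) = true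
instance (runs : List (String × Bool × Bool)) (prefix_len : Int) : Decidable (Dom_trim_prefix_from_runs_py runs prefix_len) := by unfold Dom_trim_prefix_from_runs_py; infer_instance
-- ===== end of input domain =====

-- B replaces A's single stateful consume-and-emit loop by a two-phase decomposition
-- (find the boundary run and offset, then slice and append the non-empty rest); same cost.

-- ===== PORT A =====
-- the body of A's for-loop, over the state (remaining, trimmed)
def pvStepA (st : Int × List (String × Bool × Bool)) (r : String × Bool × Bool) :
    Int × List (String × Bool × Bool) :=
  if st.1 ≥ PySem.Str.len r.1 then
    (st.1 - PySem.Str.len r.1, st.2)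
  else if st.1 > 0 then
    let rt := PySem.Str.slice r.1 (some st.1) none
    (0, if PySem.Str.len rt ≠ 0 then st.2 ++ [(rt, r.2.1, r.2.2)] else st.2)
  else
    (st.1, if PySem.Str.len r.1 ≠ 0 then st.2 ++ [(r.1, r.2.1, r.2.2)] else st.2)

def trim_prefix_from_runs_py (runs : List (String × Bool × Bool)) (prefix_len : Int) :
    List (String × Bool × Bool) :=
  (runs.foldl pvStepA (max 0 prefix_len, [])).2

-- ===== PORT B =====
-- phase 1 of Source B: the while-loop skipping runs wholly consumed by the prefix
def pvSkip : Int → List (String × Bool × Bool) → Int × List (String × Bool × Bool)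
  | k, [] => (k, [])
  | k, r :: rs => if k ≥ PySem.Str.len r.1 then pvSkip (k - PySem.Str.len r.1) rs else (k, r :: rs)

def trim_prefix_from_runs_py_alt (runs : List (String × Bool × Bool)) (prefix_len : Int) :
    List (String × Bool × Bool) :=
  match pvSkip (max 0 prefix_len) runs with
  | (_, []) => []
  | (k, (text, is_bold, is_superscript) :: rest) =>
      (PySem.Str.slice text (some k) none, is_bold, is_superscript)
        :: rest.filter (fun r => PySem.Str.len r.1 != 0)

-- ===== PRECONDITION & SPEC =====
def Spec_trim_prefix_from_runs_py (runs : List (String × Bool × Bool)) (prefix_len : Int) (out : List (String × Bool × Bool)) : Prop := out = trim_prefix_from_runs_py_alt runs prefix_len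
instance (runs : List (String × Bool × Bool)) (prefix_len : Int) (out : List (String × Bool × Bool)) : Decidable (Spec_trim_prefix_from_runs_py runs prefix_len out) := by unfold Spec_trim_prefix_from_runs_py; infer_instance

-- ===== CLAIM (what is proved, stated in full; the proofs are below) =====
def Claim_equal_trim_prefix_from_runs_py : Prop := ∀ (runs : List (String × Bool × Bool)) (prefix_len : Int), Dom_trim_prefix_from_runs_py runs prefix_len → Spec_trim_prefix_from_runs_py runs prefix_len (trim_prefix_from_runs_py runs prefix_len)

-- ===== LEMMAS AND PROOFS =====

theorem len_str (s : String) : PySem.Str.len s = (s.toList.length : Int) := by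
  simp [PySem.Str.len]

theorem toList_slice_from (s : String) (k : Int) (hk : 0 ≤ k) :
    (PySem.Str.slice s (some k) none).toList = s.toList.drop k.toNat := by
  simp [PySem.List.slice_from _ hk]

-- once remaining = 0, A's loop just filters out empty-text runs
theorem foldl_zero (rs : List (String × Bool × Bool)) (acc : List (String × Bool × Bool)) :
    (rs.foldl pvStepA (0, acc)).2 = acc ++ rs.filter (fun r => PySem.Str.len r.1 != 0) := by
  induction rs generalizing acc with
  | nil => simp
  | cons r rs ih =>
    rw [List.foldl_cons]
    by_cases h : (0 : Int) ≥ PySem.Str.len r.1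
    · have he : r.1 = "" := by
        apply String.toList_inj.mp
        have hz : r.1.toList.length = 0 := by have := len_str r.1; omega
        simpa using List.length_eq_zero_iff.mp hz
      have hstep : pvStepA (0, acc) r = (0, acc) := by
        simp only [pvStepA]; rw [if_pos h]; simp [he]
      rw [hstep, ih]
      simp [he]
    · have hnz : PySem.Str.len r.1 ≠ 0 := by
        intro hc; rw [hc] at h; exact h le_rfl
      have hstep : pvStepA (0, acc) r = (0, acc ++ [(r.1, r.2.1, r.2.2)]) := by
        simp only [pvStepA]; rw [if_neg h, if_neg (lt_irrefl (0 : Int)), if_pos hnz]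
      have hnz' : (PySem.Str.len r.1 != 0) = true := by
        simp only [bne_iff_ne, ne_eq]; exact hnz
      rw [hstep, ih, List.filter_cons, hnz']
      simp

theorem foldl_skip (rs : List (String × Bool × Bool)) (k : Int) (hk : 0 ≤ k)
    (acc : List (String × Bool × Bool)) :
    (rs.foldl pvStepA (k, acc)).2 =
      acc ++ (match pvSkip k rs with
        | (_, []) => []
        | (k', (text, b, s) :: rest) =>
            (PySem.Str.slice text (some k') none, b, s)
              :: rest.filter (fun r => PySem.Str.len r.1 != 0)) := by
  induction rs generalizing k acc with
  | nil => simp [pvSkip]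
  | cons r rs ih =>
    rw [List.foldl_cons, pvSkip]
    by_cases h : k ≥ PySem.Str.len r.1
    · have hstep : pvStepA (k, acc) r = (k - PySem.Str.len r.1, acc) := by
        simp only [pvStepA]; rw [if_pos h]
      rw [hstep, if_pos (show PySem.Str.len r.1 ≤ k from h),
        ih _ (by have := len_str r.1; omega)]
    · have hlt : k < PySem.Str.len r.1 := lt_of_not_ge h
      rw [if_neg (show ¬ PySem.Str.len r.1 ≤ k from h)]
      by_cases hp : k > 0
      · have hslice : PySem.Str.len (PySem.Str.slice r.1 (some k) none) ≠ 0 := by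
          rw [len_str, toList_slice_from _ _ hk]
          rw [len_str] at hlt
          simp only [List.length_drop]
          omega
        have hstep : pvStepA (k, acc) r =
            (0, acc ++ [(PySem.Str.slice r.1 (some k) none, r.2.1, r.2.2)]) := by
          simp only [pvStepA]; rw [if_neg h, if_pos hp, if_pos hslice]
        rw [hstep, foldl_zero]
        simp
      · have hke : k = 0 := by omega
        subst hke
        have hnz : PySem.Str.len r.1 ≠ 0 := by
          intro hc; rw [hc] at h; exact h le_rfl
        have hs0 : PySem.Str.slice r.1 (some 0) none = r.1 := by
          apply String.toList_inj.mp
          rw [toList_slice_from _ _ le_rfl]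
          simp
        have hstep : pvStepA (0, acc) r = (0, acc ++ [(r.1, r.2.1, r.2.2)]) := by
          simp only [pvStepA]; rw [if_neg h, if_neg (lt_irrefl (0 : Int)), if_pos hnz]
        rw [hstep, foldl_zero]
        simp [hs0]

-- ===== VERDICT (by name: the statement is the Claim_ definition above) =====
theorem trim_prefix_from_runs_py_spec : Claim_equal_trim_prefix_from_runs_py := by
  intro runs prefix_len _
  unfold Spec_trim_prefix_from_runs_py trim_prefix_from_runs_py trim_prefix_from_runs_py_alt
  rw [foldl_skip runs (max 0 prefix_len) (le_max_left 0 prefix_len) []]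
  simp
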